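-- pv_equiv track=rewrite | github.com/pderoovere/aoc21 | 08/part_2.py | calc_segments_by_occurances
-- ===== SOURCE A (Python) =====
-- segments = ['a', 'b', 'c', 'd', 'e', 'f', 'g']
--
-- def calc_segments_by_occurances(patterns):
--     segment_counts = {segment: 0 for segment in segments}
--     for pattern in patterns:
--         for segment in pattern:
--             segment_counts[segment] += 1
--     counts = {}
--     for count in range(len(patterns) + 1):
--         counts[count] = [s for s, c in segment_counts.items() if c == count]
--     return counts
-- ===== SOURCE B (Python) =====
-- segments = ['a', 'b', 'c', 'd', 'e', 'f', 'g']
--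
-- def calc_segments_by_occurances(patterns):
--     n = len(patterns)
--     joined = "".join(patterns)
--     counts = {k: [] for k in range(n + 1)}
--     for s in segments:
--         c = sum(ch == s for ch in joined)
--         if c <= n:
--             counts[c].append(s)
--     return counts
-- ===== Notes on version B (the rewrite author's own statement) =====
-- stated objective: alternative
-- what changed: B inverts the grouping directly: it pre-seeds one empty bucket per count 0..len(patterns) and makes a single pass over the seven segments, computing each segment's occurrence total by scanning the joined text and appending the segment to its bucket, instead of A's per-character dict increments followed by rescanning all segments once for every count value.
import Mathlib
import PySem

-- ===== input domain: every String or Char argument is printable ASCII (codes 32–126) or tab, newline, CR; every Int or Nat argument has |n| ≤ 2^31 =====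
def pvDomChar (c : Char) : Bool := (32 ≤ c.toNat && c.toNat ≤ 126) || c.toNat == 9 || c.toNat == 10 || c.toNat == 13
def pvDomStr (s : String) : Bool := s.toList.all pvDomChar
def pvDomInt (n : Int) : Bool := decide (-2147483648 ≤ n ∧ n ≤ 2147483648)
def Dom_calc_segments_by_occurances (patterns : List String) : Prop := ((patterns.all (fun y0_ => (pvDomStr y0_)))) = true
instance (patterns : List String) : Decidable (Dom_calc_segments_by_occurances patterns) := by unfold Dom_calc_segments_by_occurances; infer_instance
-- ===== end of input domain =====

-- B inverts the grouping: pre-seeded buckets filled in one pass over the seven segments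
-- (occurrence totals read off the joined text), instead of A's per-character dict increments
-- followed by a rescan of all segments for every count value.  Alternative decomposition, same cost class.

-- ===== PORT A =====
-- module constant: segments = ['a', 'b', 'c', 'd', 'e', 'f', 'g']
def pvSegs : List String := ["a", "b", "c", "d", "e", "f", "g"]

-- `segment_counts[segment] += 1` is ported as Dict.modify with default 0; on a key not already in
-- the dict Python raises KeyError — exactly those inputs are excluded by Pre_ below.
def calc_segments_by_occurances (patterns : List String) : List (Int × List String) :=
  let seg0 : PySem.Dict String Int := PySem.Dict.ofList (pvSegs.map (fun s => (s, 0)))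
  let segment_counts : PySem.Dict String Int :=
    patterns.foldl (fun d pattern =>
      pattern.toList.foldl (fun d ch => d.modify (String.mk [ch]) 0 (· + 1)) d) seg0
  let counts : PySem.Dict Int (List String) :=
    (PySem.List.pyRange 0 ((patterns.length : Int) + 1) 1).foldl
      (fun c count =>
        c.insert count ((segment_counts.items.filter (fun p => p.2 == count)).map (fun p => p.1)))
      PySem.Dict.empty
  counts.items

-- ===== PORT B =====
def calc_segments_by_occurances_alt (patterns : List String) : List (Int × List String) :=
  let n : Int := patterns.length
  -- "".join(patterns) as the concatenated character list (exact)
  let joined : List Char := patterns.foldl (fun acc p => acc ++ p.toList) []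
  let counts0 : PySem.Dict Int (List String) :=
    PySem.Dict.ofList ((PySem.List.pyRange 0 (n + 1) 1).map (fun k => (k, ([] : List String))))
  let counts : PySem.Dict Int (List String) :=
    pvSegs.foldl (fun c s =>
      let cnt : Int := joined.foldl (fun acc ch => acc + (if String.mk [ch] == s then 1 else 0)) 0
      if cnt ≤ n then c.modify cnt [] (· ++ [s]) else c) counts0
  counts.items

-- ===== PRECONDITION & SPEC =====
-- Pre_ excludes exactly the inputs on which A raises KeyError: a pattern character outside 'a'..'g'.
def Pre_calc_segments_by_occurances (patterns : List String) : Prop :=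
  ∀ p ∈ patterns, (p.toList.all (fun ch => ch ∈ (['a', 'b', 'c', 'd', 'e', 'f', 'g'] : List Char))) = true
instance (patterns : List String) : Decidable (Pre_calc_segments_by_occurances patterns) := by
  unfold Pre_calc_segments_by_occurances; infer_instance
def pvWitness_calc_segments_by_occurances : List String := ["ab", "aabc", ""]

def Spec_calc_segments_by_occurances (patterns : List String) (out : List (Int × List String)) : Prop := out = calc_segments_by_occurances_alt patterns
instance (patterns : List String) (out : List (Int × List String)) : Decidable (Spec_calc_segments_by_occurances patterns out) := by unfold Spec_calc_segments_by_occurances; infer_instance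

-- ===== CLAIM (what is proved, stated in full; the proofs are below) =====
def Claim_equal_calc_segments_by_occurances : Prop := ∀ (patterns : List String), Dom_calc_segments_by_occurances patterns → Pre_calc_segments_by_occurances patterns → Spec_calc_segments_by_occurances patterns (calc_segments_by_occurances patterns)
-- ===== LEMMAS AND PROOFS =====

theorem pv_find?_map_fst {κ ν : Type} [BEq κ] [LawfulBEq κ] (ks : List κ) (g : κ → ν) (c : κ)
    (hc : c ∈ ks) : List.find? (fun p => p.1 == c) (ks.map (fun k => (k, g k))) = some (c, g c) := by
  induction ks with
  | nil => cases hc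
  | cons a t ih =>
    by_cases h : a = c
    · subst h; simp
    · rcases List.mem_cons.mp hc with h' | h'
      · exact absurd h'.symm h
      · simpa [List.find?, h] using ih h'

-- Dict.modify on a dict of shape `ks.map (fun k => (k, g k))` with a present key rewrites one value.
theorem pv_modify_mapped {κ ν : Type} [BEq κ] [LawfulBEq κ] (ks : List κ) (g : κ → ν) (c : κ)
    (d0 : ν) (f : ν → ν) (hc : c ∈ ks) :
    (PySem.Dict.mk (ks.map (fun k => (k, g k)))).modify c d0 f
      = PySem.Dict.mk (ks.map (fun k => (k, if k == c then f (g k) else g k))) := by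
  have hget : (PySem.Dict.mk (ks.map (fun k => (k, g k)))).get? c = some (g c) := by
    simp [PySem.Dict.get?, pv_find?_map_fst ks g c hc]
  have hcont : (PySem.Dict.mk (ks.map (fun k => (k, g k)))).contains c = true := by
    simp [PySem.Dict.contains, List.any_map, List.any_eq_true]
    exact hc
  simp only [PySem.Dict.modify, PySem.Dict.insert, PySem.Dict.getD, hget, hcont, if_pos]
  congr 1
  simp only [List.map_map]
  apply List.map_congr_left
  intro k _
  by_cases h : k = c
  · subst h; simp
  · simp [h]

-- folding fresh distinct-key inserts from Dict.mk acc appends the pairs in order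
theorem pv_foldl_insert_fresh {κ ν : Type} [BEq κ] [LawfulBEq κ] (l : List (κ × ν))
    (acc : List (κ × ν)) (hd : ∀ p ∈ l, ∀ q ∈ acc, q.1 ≠ p.1) (hl : (l.map (·.1)).Nodup) :
    (l.foldl (fun d p => d.insert p.1 p.2) (PySem.Dict.mk acc)).items = acc ++ l := by
  induction l generalizing acc with
  | nil => simp
  | cons p t ih =>
    have hcont : (PySem.Dict.mk acc).contains p.1 = false := by
      simp [PySem.Dict.contains, List.any_eq_false]
      intro a b hq
      exact hd p List.mem_cons_self (a, b) hq
    have hins : (PySem.Dict.mk acc).insert p.1 p.2 = PySem.Dict.mk (acc ++ [p]) := by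
      simp [PySem.Dict.insert, hcont]
    have hnd : (t.map (·.1)).Nodup := (List.nodup_cons.mp hl).2
    have hp1 : p.1 ∉ t.map (·.1) := (List.nodup_cons.mp hl).1
    have hd' : ∀ r ∈ t, ∀ q ∈ acc ++ [p], q.1 ≠ r.1 := by
      intro r hr q hq
      rcases List.mem_append.mp hq with h | h
      · exact hd r (List.mem_cons_of_mem _ hr) q h
      · simp at h
        subst h
        intro hqr
        exact hp1 (hqr ▸ List.mem_map_of_mem hr)
    calc (List.foldl (fun d p => d.insert p.1 p.2) (PySem.Dict.mk acc) (p :: t)).items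
        = (List.foldl (fun d p => d.insert p.1 p.2) (PySem.Dict.mk (acc ++ [p])) t).items := by
          simp [List.foldl_cons, hins]
      _ = (acc ++ [p]) ++ t := ih (acc ++ [p]) hd' hnd
      _ = acc ++ p :: t := by simp

theorem pv_ofList_nodup {κ ν : Type} [BEq κ] [LawfulBEq κ] (l : List (κ × ν))
    (hl : (l.map (·.1)).Nodup) : PySem.Dict.ofList l = PySem.Dict.mk l := by
  apply PySem.Dict.ext
  show (List.foldl (fun d p => d.insert p.1 p.2) (PySem.Dict.mk []) l).items = l
  simpa using pv_foldl_insert_fresh l [] (by simp) hl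

-- A's counting loop on any char-string list inside pvSegs
theorem pv_foldA (cs : List String) (h : ∀ x ∈ cs, x ∈ pvSegs) (v : String → Int) :
    cs.foldl (fun d x => d.modify x 0 (· + 1)) (PySem.Dict.mk (pvSegs.map (fun s => (s, v s))))
      = PySem.Dict.mk (pvSegs.map (fun s => (s, v s + cs.count s))) := by
  induction cs generalizing v with
  | nil => simp
  | cons x t ih =>
    have hx : x ∈ pvSegs := h x List.mem_cons_self
    rw [List.foldl_cons, pv_modify_mapped pvSegs v x 0 (· + 1) hx,
        ih (fun y hy => h y (List.mem_cons_of_mem _ hy))]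
    congr 1
    apply List.map_congr_left
    intro s _
    by_cases hs : s = x
    · subst hs; simp [List.count_cons]; push_cast; ring
    · simp [hs, List.count_cons, Ne.symm hs]

-- B's bucket loop
theorem pv_foldB (n : Int) (cnt : String → Int) (hcnt : ∀ s, 0 ≤ cnt s)
    (L : List String) (g : Int → List String) :
    L.foldl (fun c s => if cnt s ≤ n then c.modify (cnt s) [] (· ++ [s]) else c)
        (PySem.Dict.mk ((PySem.List.pyRange 0 (n + 1) 1).map (fun k => (k, g k))))
      = PySem.Dict.mk ((PySem.List.pyRange 0 (n + 1) 1).map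
          (fun k => (k, g k ++ (L.filter (fun s => cnt s == k))))) := by
  induction L generalizing g with
  | nil => simp
  | cons s t ih =>
    rw [List.foldl_cons]
    by_cases hle : cnt s ≤ n
    · have hmem : cnt s ∈ PySem.List.pyRange 0 (n + 1) 1 := by
        rw [PySem.List.mem_pyRange_one]
        exact ⟨hcnt s, by omega⟩
      rw [if_pos hle, pv_modify_mapped _ g (cnt s) [] (· ++ [s]) hmem,
          ih (fun k => if k == cnt s then g k ++ [s] else g k)]
      congr 1
      apply List.map_congr_left
      intro k _
      by_cases hk : cnt s = k
      · subst hk; simp [List.filter_cons]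
      · simp [List.filter_cons, hk, Ne.symm hk]
    · rw [if_neg hle, ih g]
      congr 1
      apply List.map_congr_left
      intro k hk
      have hk' : k < n + 1 := (PySem.List.mem_pyRange_one.mp hk).2
      have : ¬ (cnt s = k) := by omega
      simp [this]

theorem pv_nested (patterns : List String) (d : PySem.Dict String Int) :
    patterns.foldl (fun d pattern =>
        pattern.toList.foldl (fun d ch => d.modify (String.mk [ch]) 0 (· + 1)) d) d
      = (patterns.flatMap (fun p => p.toList.map (fun ch => String.mk [ch]))).foldl
          (fun d x => d.modify x 0 (· + 1)) d := by
  induction patterns generalizing d with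
  | nil => simp
  | cons p t ih =>
    rw [List.foldl_cons, List.flatMap_cons, List.foldl_append, ih, List.foldl_map]

theorem pv_mk_mem (ch : Char) (h : ch ∈ ['a', 'b', 'c', 'd', 'e', 'f', 'g']) :
    String.mk [ch] ∈ pvSegs := by
  fin_cases h <;> decide

theorem pv_insert_loop (l : List Int) (hl : l.Nodup) (F : Int → List String) :
    (l.foldl (fun c k => c.insert k (F k)) (PySem.Dict.empty : PySem.Dict Int (List String))).items
      = l.map (fun k => (k, F k)) := by
  have h : l.foldl (fun c k => c.insert k (F k)) (PySem.Dict.empty : PySem.Dict Int (List String))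
       = (l.map (fun k => (k, F k))).foldl (fun d p => d.insert p.1 p.2) (PySem.Dict.mk []) := by
    rw [List.foldl_map]
    rfl
  rw [h, pv_foldl_insert_fresh _ [] (by simp)
        (by simpa [List.map_map, Function.comp_def] using hl)]
  simp

theorem pv_cnt_chars (l : List Char) (s : String) (a : Int) :
    l.foldl (fun acc ch => acc + if String.mk [ch] == s then (1 : Int) else 0) a
      = a + ((l.map (fun ch => String.mk [ch])).count s : Int) := by
  induction l generalizing a with
  | nil => simp
  | cons ch t ih =>
    rw [List.foldl_cons, ih]
    by_cases h : String.mk [ch] = s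
    · simp [h, List.count_cons]; push_cast; ring
    · simp [h, List.count_cons, Ne.symm h]

-- characterization of A on Pre_ inputs
theorem pv_A_char (patterns : List String) (hpre : Pre_calc_segments_by_occurances patterns) :
    calc_segments_by_occurances patterns
      = (PySem.List.pyRange 0 ((patterns.length : Int) + 1) 1).map
          (fun k => (k, pvSegs.filter (fun s =>
            (((patterns.flatMap (fun p => p.toList.map (fun ch => String.mk [ch]))).count s : Int)) == k))) := by
  have hcs : ∀ x ∈ patterns.flatMap (fun p => p.toList.map (fun ch => String.mk [ch])), x ∈ pvSegs := by
    intro x hx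
    rcases List.mem_flatMap.mp hx with ⟨p, hp, hx⟩
    rcases List.mem_map.mp hx with ⟨ch, hch, rfl⟩
    have hall := hpre p hp
    rw [List.all_eq_true] at hall
    exact pv_mk_mem ch (by simpa using hall ch hch)
  simp only [calc_segments_by_occurances]
  rw [pv_ofList_nodup _ (by simp [pvSegs]), pv_nested,
      pv_foldA _ hcs (fun _ => 0),
      pv_insert_loop _ (PySem.List.nodup_pyRange_one 0 ((patterns.length : Int) + 1))]
  apply List.map_congr_left
  intro k _
  simp [List.filter_map, List.map_map, Function.comp_def]

-- characterization of B (total)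
theorem pv_B_char (patterns : List String) :
    calc_segments_by_occurances_alt patterns
      = (PySem.List.pyRange 0 ((patterns.length : Int) + 1) 1).map
          (fun k => (k, pvSegs.filter (fun s =>
            (((patterns.flatMap (fun p => p.toList.map (fun ch => String.mk [ch]))).count s : Int)) == k))) := by
  simp only [calc_segments_by_occurances_alt]
  rw [PySem.List.foldl_append_eq_flatMap (fun p => String.toList p) patterns [],
      pv_ofList_nodup _ (by simpa [List.map_map, Function.comp_def] using
        PySem.List.nodup_pyRange_one 0 ((patterns.length : Int) + 1))]
  have hbody : (fun (c : PySem.Dict Int (List String)) (s : String) =>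
      if (([] ++ patterns.flatMap (fun p => String.toList p)).foldl
            (fun acc ch => acc + if String.mk [ch] == s then (1 : Int) else 0) 0) ≤ (patterns.length : Int)
      then c.modify (([] ++ patterns.flatMap (fun p => String.toList p)).foldl
            (fun acc ch => acc + if String.mk [ch] == s then (1 : Int) else 0) 0) [] (· ++ [s]) else c)
      = (fun (c : PySem.Dict Int (List String)) (s : String) =>
      if ((patterns.flatMap (fun p => p.toList.map (fun ch => String.mk [ch]))).count s : Int) ≤ (patterns.length : Int)
      then c.modify ((patterns.flatMap (fun p => p.toList.map (fun ch => String.mk [ch]))).count s : Int) [] (· ++ [s]) else c) := by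
    funext c s
    rw [List.nil_append, pv_cnt_chars, Int.zero_add, List.map_flatMap]
  rw [hbody, pv_foldB (patterns.length : Int) _ (fun s => by positivity) pvSegs (fun _ => [])]
  simp only [List.nil_append]

-- ===== VERDICT (by name: the statement is the Claim_ definition above) =====
theorem calc_segments_by_occurances_spec : Claim_equal_calc_segments_by_occurances := by
  intro patterns _ hpre
  unfold Spec_calc_segments_by_occurances
  rw [pv_A_char patterns hpre, pv_B_char patterns]
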